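-- pv_equiv track=rewrite | github.com/prashantssingh/competitive-coding | untracked/goldmansachs_maximal_communality.py | maximal_commanality
-- ===== SOURCE A (Python) =====
-- def maximal_commanality(s):
--     if not s or len(s) == 1:
--         return 0
--
--     freq1 = [0] * 26
--     freq2 = [0] * 26
--
--     for ch in s:
--         freq2[ord(ch) - ord('a')] += 1
--
--     count = 0
--     for i in range(len(s)):
--         curr_count = 0
--         for alph_ind in range(26):
--             curr_count += min(freq1[alph_ind], freq2[alph_ind]);
--         count = max(count, curr_count)
--
--         freq1[ord(s[i]) - ord('a')] += 1
--         freq2[ord(s[i]) - ord('a')] -= 1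
--
--     return count
-- ===== SOURCE B (Python) =====
-- def maximal_commanality(s):
--     n = len(s)
--     if n < 2:
--         return 0
--     prefix = [0] * 26
--     suffix = [0] * 26
--     for ch in s:
--         suffix[ord(ch) - ord('a')] += 1
--     best = 0
--     total = 0  # running sum of per-letter mins; only one letter changes per step
--     for ch in s[:-1]:
--         b = ord(ch) - ord('a')
--         total -= min(prefix[b], suffix[b])
--         prefix[b] += 1
--         suffix[b] -= 1
--         total += min(prefix[b], suffix[b])
--         if total > best:
--             best = total
--     return best
-- ===== Notes on version B (the rewrite author's own statement) =====
-- stated objective: faster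
-- what changed: B keeps a running sum of per-letter mins and updates only the moved character's bucket at each split point, instead of A's rescan of all 26 buckets per position.
import Mathlib
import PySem

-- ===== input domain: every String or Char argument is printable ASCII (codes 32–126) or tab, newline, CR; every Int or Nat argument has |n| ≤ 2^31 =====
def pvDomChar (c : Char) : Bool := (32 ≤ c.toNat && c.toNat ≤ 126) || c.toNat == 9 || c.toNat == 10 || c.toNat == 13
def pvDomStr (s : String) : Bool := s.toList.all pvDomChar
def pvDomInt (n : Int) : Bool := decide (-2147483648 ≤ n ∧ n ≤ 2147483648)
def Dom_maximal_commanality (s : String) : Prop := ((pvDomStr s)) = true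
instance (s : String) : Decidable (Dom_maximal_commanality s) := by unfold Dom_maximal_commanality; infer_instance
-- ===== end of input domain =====

-- B replaces A's per-split rescan of all 26 letter buckets by a running sum of mins
-- updated only at the one bucket the moved character changes (objective: faster).

-- ===== PORT A =====
-- ord(ch) - ord('a')
def pvChIdx (c : Char) : Int := (c.toNat : Int) - 97

-- A's inner loop: 'for alph_ind in range(26): curr_count += min(freq1[...], freq2[...])'
def pvSumMin (f1 f2 : List Int) : Int :=
  (PySem.List.pyRange 0 26 1).foldl
    (fun acc j => acc + min (PySem.List.pyGetD f1 j 0) (PySem.List.pyGetD f2 j 0)) 0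

-- body of A's 'for i in range(len(s))' loop, on the character s[i]
def pvStepA (st : Int × List Int × List Int) (c : Char) : Int × List Int × List Int :=
  let (count, f1, f2) := st
  let currCount := pvSumMin f1 f2
  let count := max count currCount
  let b := pvChIdx c
  (count,
   PySem.List.pySetD f1 b (PySem.List.pyGetD f1 b 0 + 1),
   PySem.List.pySetD f2 b (PySem.List.pyGetD f2 b 0 - 1))

def maximal_commanality (s : String) : Int :=
  if s.toList.length = 0 ∨ s.toList.length = 1 then 0
  else
    let freq2 := s.toList.foldl
      (fun f ch => PySem.List.pySetD f (pvChIdx ch) (PySem.List.pyGetD f (pvChIdx ch) 0 + 1))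
      (List.replicate 26 0)
    ((PySem.List.pyRange 0 (s.toList.length) 1).foldl
      (fun st i => pvStepA st (PySem.List.pyGetD s.toList i ' '))
      (0, List.replicate 26 0, freq2)).1

-- ===== PORT B =====
-- body of B's 'for ch in s[:-1]' loop: move ch from suffix to prefix, fix up the
-- running total at ch's bucket only, track the best total
def pvStepB (st : Int × Int × List Int × List Int) (c : Char) : Int × Int × List Int × List Int :=
  let (best, total, p, q) := st
  let b := pvChIdx c
  let total := total - min (PySem.List.pyGetD p b 0) (PySem.List.pyGetD q b 0)
  let p := PySem.List.pySetD p b (PySem.List.pyGetD p b 0 + 1)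
  let q := PySem.List.pySetD q b (PySem.List.pyGetD q b 0 - 1)
  let total := total + min (PySem.List.pyGetD p b 0) (PySem.List.pyGetD q b 0)
  let best := if best < total then total else best
  (best, total, p, q)

def maximal_commanality_alt (s : String) : Int :=
  if s.toList.length < 2 then 0
  else
    let suffix := s.toList.foldl
      (fun f ch => PySem.List.pySetD f (pvChIdx ch) (PySem.List.pyGetD f (pvChIdx ch) 0 + 1))
      (List.replicate 26 0)
    ((PySem.List.slice s.toList none (some (-1))).foldl pvStepB
      (0, 0, List.replicate 26 0, suffix)).1

-- ===== PRECONDITION & SPEC =====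
-- Pre_ excludes exactly the strings of length ≥ 2 containing a character with code
-- outside [71, 122]: there ord(ch)-ord('a') falls outside [-26, 25] and A raises
-- IndexError (B raises on the same inputs).
def Pre_maximal_commanality (s : String) : Prop :=
  2 ≤ s.toList.length → s.toList.all (fun c => 71 ≤ c.toNat && c.toNat ≤ 122) = true
instance (s : String) : Decidable (Pre_maximal_commanality s) := by
  unfold Pre_maximal_commanality; infer_instance
def pvWitness_maximal_commanality : String := "abcab"

def Spec_maximal_commanality (s : String) (out : Int) : Prop := out = maximal_commanality_alt s
instance (s : String) (out : Int) : Decidable (Spec_maximal_commanality s out) := by unfold Spec_maximal_commanality; infer_instance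

-- ===== CLAIM (what is proved, stated in full; the proofs are below) =====
def Claim_equal_maximal_commanality : Prop := ∀ (s : String), Dom_maximal_commanality s → Pre_maximal_commanality s → Spec_maximal_commanality s (maximal_commanality s)

-- ===== LEMMAS AND PROOFS =====

-- the Nat bucket a valid character lands in (its wrapped index)
def pvJ (c : Char) : Nat := if c.toNat < 97 then c.toNat - 71 else c.toNat - 97

def pvValid (c : Char) : Prop := 71 ≤ c.toNat ∧ c.toNat ≤ 122

theorem pvJ_lt (c : Char) (hc : pvValid c) : pvJ c < 26 := by
  unfold pvJ; rcases hc with ⟨h1, h2⟩; split <;> omega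

theorem pvGet_valid (p : List Int) (c : Char) (d : Int) (hc : pvValid c) (hp : p.length = 26) :
    PySem.List.pyGetD p (pvChIdx c) d = p.getD (pvJ c) d := by
  rcases hc with ⟨h1, h2⟩
  by_cases h : c.toNat < 97
  · have hk : pvChIdx c = -(((97 - c.toNat : Nat)) : Int) := by unfold pvChIdx; omega
    rw [hk, PySem.List.pyGetD_neg_natCast _ _ _ (by omega) (by omega),
      List.getD_eq_getElem p d (by unfold pvJ; simp [h]; omega)]
    congr 1
    unfold pvJ
    simp only [if_pos h]
    omega
  · have hb : (0:Int) ≤ pvChIdx c := by unfold pvChIdx; omega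
    rw [PySem.List.pyGetD_of_nonneg p d hb]
    congr 1
    unfold pvChIdx pvJ
    simp only [if_neg h]
    omega

theorem pvSet_valid (p : List Int) (c : Char) (v : Int) (hc : pvValid c) (hp : p.length = 26) :
    PySem.List.pySetD p (pvChIdx c) v = p.set (pvJ c) v := by
  rcases hc with ⟨h1, h2⟩
  by_cases h : c.toNat < 97
  · have hk : pvChIdx c = -(((97 - c.toNat : Nat)) : Int) := by unfold pvChIdx; omega
    rw [hk]
    simp only [PySem.List.pySetD, PySem.List.pySet?, PySem.List.pyIdx?]
    rw [if_neg (by omega : ¬((0:Int) ≤ -((97 - c.toNat : Nat):Int))),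
      if_pos (by omega : -((p.length:Int)) ≤ -((97 - c.toNat : Nat):Int))]
    simp only [Option.map_some, Option.getD_some]
    congr 1
    unfold pvJ
    simp only [if_pos h]
    omega
  · have hb : (0:Int) ≤ pvChIdx c := by unfold pvChIdx; omega
    rw [PySem.List.pySetD_of_nonneg p v hb]
    congr 1
    unfold pvChIdx pvJ
    simp only [if_neg h]
    omega

theorem pvGetD_set_ite (p : List Int) (j k : Nat) (v : Int) (hk : k < p.length) :
    (p.set j v).getD k 0 = if k = j then v else p.getD k 0 := by
  by_cases h : k = j
  · subst h; simp [List.getD, hk]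
  · have h' : j ≠ k := fun hh => h hh.symm
    simp [List.getD, h', h]

theorem pvSumMin_eq (p q : List Int) :
    pvSumMin p q = ((List.range 26).map (fun k => min (p.getD k 0) (q.getD k 0))).sum := by
  unfold pvSumMin
  rw [PySem.List.pyRange_one,
    PySem.List.foldl_add _ (fun j => min (PySem.List.pyGetD p j 0) (PySem.List.pyGetD q j 0)) 0]
  simp [List.map_map, Function.comp_def]

theorem pvSumMin_set (p q : List Int) (j : Nat) (a b : Int)
    (hp : p.length = 26) (hq : q.length = 26) (hj : j < 26) :
    pvSumMin (p.set j a) (q.set j b) =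
      pvSumMin p q - min (p.getD j 0) (q.getD j 0) + min a b := by
  rw [pvSumMin_eq, pvSumMin_eq]
  have hconv : ∀ f : Nat → Int, ((List.range 26).map f).sum = ∑ k ∈ Finset.range 26, f k := by
    intro f; exact Int.neg_inj.mp rfl
  rw [hconv, hconv]
  have hpt : ∀ k ∈ Finset.range 26,
      min ((p.set j a).getD k 0) ((q.set j b).getD k 0) =
        Function.update (fun k => min (p.getD k 0) (q.getD k 0)) j (min a b) k := by
    intro k hk
    simp only [Finset.mem_range] at hk
    rw [pvGetD_set_ite p j k a (by omega), pvGetD_set_ite q j k b (by omega)]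
    by_cases h : k = j
    · subst h; simp [Function.update]
    · simp [Function.update, h]
  rw [Finset.sum_congr rfl hpt,
    Finset.sum_update_of_mem (Finset.mem_range.mpr hj),
    ← Finset.add_sum_erase _ _ (Finset.mem_range.mpr hj), Finset.erase_eq]
  ring

-- the frequency-counting fold: length stays 26 and entries stay nonnegative
theorem pvCount_inv (cs : List Char) (f : List Int)
    (hcs : ∀ c ∈ cs, pvValid c) (hf : f.length = 26) (hnn : ∀ x ∈ f, 0 ≤ x) :
    (cs.foldl (fun f ch => PySem.List.pySetD f (pvChIdx ch)
        (PySem.List.pyGetD f (pvChIdx ch) 0 + 1)) f).length = 26 ∧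
    ∀ x ∈ cs.foldl (fun f ch => PySem.List.pySetD f (pvChIdx ch)
        (PySem.List.pyGetD f (pvChIdx ch) 0 + 1)) f, 0 ≤ x := by
  induction cs generalizing f with
  | nil => exact ⟨hf, hnn⟩
  | cons c cs ih =>
    have hc := hcs c (List.mem_cons_self ..)
    have hrest : ∀ c' ∈ cs, pvValid c' := fun c' h => hcs c' (List.mem_cons_of_mem _ h)
    simp only [List.foldl_cons]
    rw [pvGet_valid f c 0 hc hf, pvSet_valid f c _ hc hf]
    refine ih _ hrest (by simp [hf]) ?_
    intro x hx
    rcases List.mem_or_eq_of_mem_set hx with h | h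
    · exact hnn x h
    · have hj := pvJ_lt c hc
      have hjf : pvJ c < f.length := by omega
      rw [h, List.getD_eq_getElem f 0 hjf]
      have := hnn _ (List.getElem_mem hjf)
      omega

theorem pvSumMin_zero (q : List Int) (hq : ∀ x ∈ q, 0 ≤ x) :
    pvSumMin (List.replicate 26 0) q = 0 := by
  rw [pvSumMin_eq]
  apply List.sum_eq_zero
  intro x hx
  simp only [List.mem_map, List.mem_range] at hx
  obtain ⟨k, hk, rfl⟩ := hx
  have h0 : (List.replicate 26 (0:Int)).getD k 0 = 0 := by
    rw [List.getD_eq_getElem _ _ (by simpa using hk)]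
    exact List.getElem_replicate ..
  rw [h0]
  have : 0 ≤ q.getD k 0 := by
    rcases Nat.lt_or_ge k q.length with h | h
    · exact hq _ (by rw [List.getD_eq_getElem q 0 h]; exact List.getElem_mem h)
    · simp [List.getD_eq_getElem?_getD, List.getElem?_eq_none (by omega : q.length ≤ k)]
  omega

-- the main loop invariant: B's fold state is determined by A's fold state
theorem pvLoop_inv (ds : List Char) (count total best : Int) (f1 f2 : List Int)
    (hds : ∀ c ∈ ds, pvValid c) (h1 : f1.length = 26) (h2 : f2.length = 26)
    (htot : total = pvSumMin f1 f2) (hbest : best = max count total) :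
    ds.foldl pvStepB (best, total, f1, f2) =
      (max (ds.foldl pvStepA (count, f1, f2)).1
         (pvSumMin (ds.foldl pvStepA (count, f1, f2)).2.1 (ds.foldl pvStepA (count, f1, f2)).2.2),
       pvSumMin (ds.foldl pvStepA (count, f1, f2)).2.1 (ds.foldl pvStepA (count, f1, f2)).2.2,
       (ds.foldl pvStepA (count, f1, f2)).2.1, (ds.foldl pvStepA (count, f1, f2)).2.2) := by
  induction ds generalizing count total best f1 f2 with
  | nil =>
    simp only [List.foldl_nil]
    rw [← htot, hbest]
  | cons c ds ih =>
    have hc := hds c (List.mem_cons_self ..)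
    have hj := pvJ_lt c hc
    have hrest : ∀ c' ∈ ds, pvValid c' := fun c' h => hds c' (List.mem_cons_of_mem _ h)
    simp only [List.foldl_cons]
    have hA : pvStepA (count, f1, f2) c =
        (max count total, f1.set (pvJ c) (f1.getD (pvJ c) 0 + 1),
          f2.set (pvJ c) (f2.getD (pvJ c) 0 - 1)) := by
      simp only [pvStepA, ← htot]
      rw [pvGet_valid f1 c 0 hc h1, pvGet_valid f2 c 0 hc h2,
        pvSet_valid f1 c _ hc h1, pvSet_valid f2 c _ hc h2]
    have hB : pvStepB (best, total, f1, f2) c =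
        (max best (total - min (f1.getD (pvJ c) 0) (f2.getD (pvJ c) 0)
            + min (f1.getD (pvJ c) 0 + 1) (f2.getD (pvJ c) 0 - 1)),
         total - min (f1.getD (pvJ c) 0) (f2.getD (pvJ c) 0)
            + min (f1.getD (pvJ c) 0 + 1) (f2.getD (pvJ c) 0 - 1),
         f1.set (pvJ c) (f1.getD (pvJ c) 0 + 1),
         f2.set (pvJ c) (f2.getD (pvJ c) 0 - 1)) := by
      have g1 : PySem.List.pyGetD (f1.set (pvJ c) (f1.getD (pvJ c) 0 + 1)) (pvChIdx c) 0
          = f1.getD (pvJ c) 0 + 1 := by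
        rw [pvGet_valid _ c 0 hc (by simp [h1]), pvGetD_set_ite f1 _ _ _ (by omega), if_pos rfl]
      have g2 : PySem.List.pyGetD (f2.set (pvJ c) (f2.getD (pvJ c) 0 - 1)) (pvChIdx c) 0
          = f2.getD (pvJ c) 0 - 1 := by
        rw [pvGet_valid _ c 0 hc (by simp [h2]), pvGetD_set_ite f2 _ _ _ (by omega), if_pos rfl]
      simp only [pvStepB]
      rw [pvGet_valid f1 c 0 hc h1, pvGet_valid f2 c 0 hc h2,
        pvSet_valid f1 c _ hc h1, pvSet_valid f2 c _ hc h2, g1, g2]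
      congr 1
      split <;> omega
    rw [hA, hB]
    rw [ih _ _ _ _ _ hrest (by simp [h1]) (by simp [h2])
      (by rw [pvSumMin_set f1 f2 (pvJ c) _ _ h1 h2 hj, htot])
      (by rw [hbest])]

theorem pvValid_of_pre (s : String) (h : Pre_maximal_commanality s)
    (hlen : 2 ≤ s.toList.length) : ∀ c ∈ s.toList, pvValid c := by
  intro c hc
  have := List.all_eq_true.mp (h hlen) c hc
  unfold pvValid
  simp only [Bool.and_eq_true, decide_eq_true_eq] at this
  exact this

-- ===== VERDICT (by name: the statement is the Claim_ definition above) =====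
theorem maximal_commanality_spec : Claim_equal_maximal_commanality := by
  intro s _ hpre
  unfold Spec_maximal_commanality maximal_commanality maximal_commanality_alt
  by_cases hshort : s.toList.length = 0 ∨ s.toList.length = 1
  · rw [if_pos hshort, if_pos (by omega)]
  · have hlen : 2 ≤ s.toList.length := by omega
    have hvalid := pvValid_of_pre s hpre hlen
    rw [if_neg hshort, if_neg (by omega)]
    simp only
    -- A's index loop is a fold over the characters
    rw [PySem.List.foldl_pyRange_zero_pyGetD' s.toList ' ' pvStepA _]
    -- B's loop runs over s[:-1] = dropLast
    rw [PySem.List.slice_to_neg_one]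
    -- split off the last character of A's loop
    set cs := s.toList with hcs
    have hne : cs ≠ [] := by intro h; rw [h] at hlen; simp at hlen
    have hsplit : cs = cs.dropLast ++ [cs.getLast hne] :=
      (List.dropLast_append_getLast hne).symm
    -- frequency table facts
    obtain ⟨hql, hqn⟩ := pvCount_inv cs (List.replicate 26 0) hvalid (by simp)
      (by intro x hx; simp at hx; omega)
    set q := cs.foldl (fun f ch => PySem.List.pySetD f (pvChIdx ch)
        (PySem.List.pyGetD f (pvChIdx ch) 0 + 1)) (List.replicate 26 (0:Int)) with hqdef
    have hdvalid : ∀ c ∈ cs.dropLast, pvValid c := fun c h =>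
      hvalid c (List.mem_of_mem_dropLast h)
    have hinv := pvLoop_inv cs.dropLast 0 0 0 (List.replicate 26 0) q hdvalid
      (by simp) hql (by rw [pvSumMin_zero q hqn]) (by simp)
    rw [hinv]
    conv_lhs => rw [hsplit]
    rw [List.foldl_append]
    simp only [List.foldl_cons, List.foldl_nil, pvStepA]
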